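-- pv_equiv track=rewrite | github.com/MattXcz/CEZ | custom_components/cez/sensor.py | _is_minute_in_nt
-- ===== SOURCE A (Python) =====
-- def _parse_hhmm(value: str) -> int | None:
--     try:
--         hour_str, minute_str = value.split(":", 1)
--         hour = int(hour_str)
--         minute = int(minute_str)
--     except (ValueError, AttributeError):
--         return None
--
--     if hour == 24 and minute == 0:
--         return 24 * 60
--     if 0 <= hour < 24 and 0 <= minute < 60:
--         return hour * 60 + minute
--     return None
--
-- def _normalize_nt_intervals(intervals: list[dict]) -> list[tuple[int, int]]:
--     """Normalizuje NT intervaly do minut a sloučí překryvy i návaznosti přes půlnoc."""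
--     segments: list[tuple[int, int]] = []
--     for interval in intervals:
--         start = _parse_hhmm(interval.get("from", ""))
--         end = _parse_hhmm(interval.get("to", ""))
--         if start is None or end is None or start == end:
--             continue
--
--         if end > start:
--             segments.append((start, end))
--         else:
--             segments.append((start, 24 * 60))
--             segments.append((0, end))
--
--     if not segments:
--         return []
--
--     segments.sort(key=lambda x: (x[0], x[1]))
--     merged: list[list[int]] = []
--     for start, end in segments:
--         if not merged:
--             merged.append([start, end])
--             continue
--
--         last = merged[-1]
--         if start <= last[1]:
--             last[1] = max(last[1], end)
--         else:
--             merged.append([start, end])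
--
--     normalized = [(start, end) for start, end in merged]
--
--     if normalized and normalized[0][0] == 0 and normalized[-1][1] == 24 * 60:
--         wrapped = (normalized[-1][0], normalized[0][1] + 24 * 60)
--         middle = normalized[1:-1]
--         return middle + [wrapped]
--
--     return normalized
--
-- def _is_minute_in_nt(intervals: list[dict], minute: int) -> bool:
--     minute %= 24 * 60
--     segments = _normalize_nt_intervals(intervals)
--     for start, end in segments:
--         if start <= minute < end:
--             return True
--         if end > 24 * 60 and start <= minute + 24 * 60 < end:
--             return True
--     return False
-- ===== SOURCE B (Python) =====
-- def _parse_hhmm(value: str) -> int | None: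
--     try:
--         hour_str, minute_str = value.split(":", 1)
--         hour = int(hour_str)
--         minute = int(minute_str)
--     except (ValueError, AttributeError):
--         return None
--     if hour == 24 and minute == 0:
--         return 24 * 60
--     if 0 <= hour < 24 and 0 <= minute < 60:
--         return hour * 60 + minute
--     return None
--
-- def _is_minute_in_nt(intervals: list, minute: int) -> bool:
--     # One direct pass over the raw intervals: no sort, no merge, no wrap rebuild.
--     minute %= 24 * 60
--     for interval in intervals:
--         start = _parse_hhmm(interval.get("from", ""))
--         end = _parse_hhmm(interval.get("to", ""))
--         if start is None or end is None or start == end: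
--             continue
--         if end > start:
--             if start <= minute < end:
--                 return True
--         else:  # wraps past midnight
--             if minute >= start or minute < end:
--                 return True
--     return False
-- ===== Notes on version B (the rewrite author's own statement) =====
-- stated objective: simpler
-- what changed: B tests membership in one direct pass over the raw intervals (a wrapping interval checked inline as 'minute >= start or minute < end') instead of building, sorting, merging and midnight-rewrapping a segment list before scanning it.
import Mathlib
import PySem

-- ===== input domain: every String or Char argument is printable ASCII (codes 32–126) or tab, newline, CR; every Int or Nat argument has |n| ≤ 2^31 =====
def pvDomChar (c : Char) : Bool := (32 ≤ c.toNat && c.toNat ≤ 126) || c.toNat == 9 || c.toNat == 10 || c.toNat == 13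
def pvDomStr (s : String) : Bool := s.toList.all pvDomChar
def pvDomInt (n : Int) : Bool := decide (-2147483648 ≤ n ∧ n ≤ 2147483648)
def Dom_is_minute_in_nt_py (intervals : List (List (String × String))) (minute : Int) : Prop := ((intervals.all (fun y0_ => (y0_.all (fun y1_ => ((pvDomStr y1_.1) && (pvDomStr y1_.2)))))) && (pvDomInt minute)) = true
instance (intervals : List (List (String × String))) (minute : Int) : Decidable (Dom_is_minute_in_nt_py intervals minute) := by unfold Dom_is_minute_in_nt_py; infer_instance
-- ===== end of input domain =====

-- B replaces A's build-sort-merge-rewrap of a segment list by a single direct pass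
-- over the raw intervals (objective: simpler, same observed running time).

-- ===== PORT A =====

-- dict.get(k, dflt) on an association list (first match = the dict's stored value)
def dictGetD (d : List (String × String)) (k dflt : String) : String :=
  match d.find? (fun p => p.1 == k) with
  | some p => p.2
  | none => dflt

-- _parse_hhmm (shared module helper, used verbatim by both A and B)
def parse_hhmm (value : String) : Option Int :=
  match PySem.Str.splitMax? value ":" 1 with
  | none => none
  | some parts =>
    match parts with
    | [hour_str, minute_str] =>
      match PySem.Int.ofStr? hour_str, PySem.Int.ofStr? minute_str with
      | some hour, some minute =>
        if hour = 24 ∧ minute = 0 then some (24 * 60)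
        else if 0 ≤ hour ∧ hour < 24 ∧ 0 ≤ minute ∧ minute < 60 then some (hour * 60 + minute)
        else none
      | _, _ => none
    | _ => none

-- body of the first for-loop of _normalize_nt_intervals (appends to `segments`)
def segStep (segments : List (Int × Int)) (interval : List (String × String)) : List (Int × Int) :=
  match parse_hhmm (dictGetD interval "from" ""), parse_hhmm (dictGetD interval "to" "") with
  | some start, some «end» =>
    if start = «end» then segments
    else if «end» > start then segments ++ [(start, «end»)]
    else segments ++ [(start, 24 * 60), (0, «end»)]
  | _, _ => segments

-- body of the merge loop of _normalize_nt_intervals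
def mergeStep (merged : List (Int × Int)) (se : Int × Int) : List (Int × Int) :=
  match merged.getLast? with
  | none => merged ++ [se]
  | some last =>
    if se.1 ≤ last.2 then merged.dropLast ++ [(last.1, max last.2 se.2)]
    else merged ++ [se]

def normalize_nt_intervals (intervals : List (List (String × String))) : List (Int × Int) :=
  let segments := intervals.foldl segStep []
  if segments = [] then []
  else
    let segments := PySem.List.sorted2 segments (fun x => x.1) (fun x => x.2)
    let normalized := segments.foldl mergeStep []
    match normalized.head?, normalized.getLast? with
    | some first, some last =>
      if first.1 = 0 ∧ last.2 = 24 * 60 then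
        (normalized.drop 1).dropLast ++ [(last.1, first.2 + 24 * 60)]   -- normalized[1:-1] + [wrapped]
      else normalized
    | _, _ => normalized

-- body of A's final scan (the two early-return tests of its for loop)
def scanTest (m : Int) (p : Int × Int) : Bool :=
  (decide (p.1 ≤ m) && decide (m < p.2)) ||
  (decide (p.2 > 24 * 60) && decide (p.1 ≤ m + 24 * 60) && decide (m + 24 * 60 < p.2))

def is_minute_in_nt_py (intervals : List (List (String × String))) (minute : Int) : Bool :=
  let m := PySem.Int.mod minute (24 * 60)
  (normalize_nt_intervals intervals).any (scanTest m)

-- ===== PORT B =====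

-- B's per-interval test: direct membership, a wrapping interval split inline
def altTest (m : Int) (interval : List (String × String)) : Bool :=
  match parse_hhmm (dictGetD interval "from" ""), parse_hhmm (dictGetD interval "to" "") with
  | some start, some «end» =>
    if start = «end» then false
    else if «end» > start then decide (start ≤ m) && decide (m < «end»)
    else decide (m ≥ start) || decide (m < «end»)
  | _, _ => false

def is_minute_in_nt_py_alt (intervals : List (List (String × String))) (minute : Int) : Bool :=
  let m := PySem.Int.mod minute (24 * 60)
  intervals.any (altTest m)

-- ===== PRECONDITION & SPEC =====
def Spec_is_minute_in_nt_py (intervals : List (List (String × String))) (minute : Int) (out : Bool) : Prop := out = is_minute_in_nt_py_alt intervals minute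
instance (intervals : List (List (String × String))) (minute : Int) (out : Bool) : Decidable (Spec_is_minute_in_nt_py intervals minute out) := by unfold Spec_is_minute_in_nt_py; infer_instance

-- ===== CLAIM (what is proved, stated in full; the proofs are below) =====
def Claim_equal_is_minute_in_nt_py : Prop := ∀ (intervals : List (List (String × String))) (minute : Int), Dom_is_minute_in_nt_py intervals minute → Spec_is_minute_in_nt_py intervals minute (is_minute_in_nt_py intervals minute)

-- ===== LEMMAS AND PROOFS =====

-- m is covered by one of the half-open segments of l
def Cov (m : Int) (l : List (Int × Int)) : Prop := ∃ p ∈ l, p.1 ≤ m ∧ m < p.2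

-- every segment the first loop appends satisfies these bounds
def SegB (p : Int × Int) : Prop := 0 ≤ p.1 ∧ p.1 ≤ p.2 ∧ p.2 ≤ 1440

theorem Cov_append (m : Int) (l₁ l₂ : List (Int × Int)) :
    Cov m (l₁ ++ l₂) ↔ Cov m l₁ ∨ Cov m l₂ := by
  simp [Cov, or_and_right, exists_or]

theorem Cov_nil (m : Int) : ¬ Cov m [] := by simp [Cov]

theorem Cov_cons (m : Int) (p : Int × Int) (l : List (Int × Int)) :
    Cov m (p :: l) ↔ (p.1 ≤ m ∧ m < p.2) ∨ Cov m l := by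
  simp only [Cov, List.mem_cons]
  constructor
  · rintro ⟨q, rfl | hq, h⟩
    · exact Or.inl h
    · exact Or.inr ⟨q, hq, h⟩
  · rintro (h | ⟨q, hq, h⟩)
    · exact ⟨p, Or.inl rfl, h⟩
    · exact ⟨q, Or.inr hq, h⟩

theorem Cov_singleton (m : Int) (p : Int × Int) :
    Cov m [p] ↔ (p.1 ≤ m ∧ m < p.2) := by
  rw [Cov_cons]; simp [Cov_nil m]

theorem parse_hhmm_bounds (v : String) (n : Int) (h : parse_hhmm v = some n) :
    0 ≤ n ∧ n ≤ 1440 := by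
  unfold parse_hhmm at h
  repeat' split at h
  all_goals simp_all
  all_goals omega

theorem segStep_bounds (acc : List (Int × Int)) (iv : List (String × String))
    (hacc : ∀ p ∈ acc, SegB p) : ∀ p ∈ segStep acc iv, SegB p := by
  unfold segStep
  rcases h1 : parse_hhmm (dictGetD iv "from" "") with _ | s <;>
    rcases h2 : parse_hhmm (dictGetD iv "to" "") with _ | e
  · exact hacc
  · exact hacc
  · exact hacc
  have hs := parse_hhmm_bounds _ _ h1
  have he := parse_hhmm_bounds _ _ h2
  simp only []
  split
  · exact hacc
  split <;> intro p hp <;> rcases List.mem_append.1 hp with h | h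
  · exact hacc p h
  · simp at h; subst h; exact ⟨by omega, by omega, by omega⟩
  · exact hacc p h
  · rcases List.mem_cons.1 h with rfl | h
    · exact ⟨by omega, by omega, by norm_num⟩
    · simp at h; subst h; exact ⟨le_refl 0, by omega, by omega⟩

theorem foldl_segStep_bounds (ivs : List (List (String × String))) :
    ∀ acc, (∀ p ∈ acc, SegB p) → ∀ p ∈ ivs.foldl segStep acc, SegB p := by
  induction ivs with
  | nil => intro acc hacc; simpa using hacc
  | cons iv ivs ih =>
    intro acc hacc
    exact ih _ (segStep_bounds acc iv hacc)

theorem Cov_segStep (m : Int) (acc : List (Int × Int)) (iv : List (String × String))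
    (hm0 : 0 ≤ m) (hm1 : m < 1440) :
    Cov m (segStep acc iv) ↔ Cov m acc ∨ altTest m iv = true := by
  unfold segStep altTest
  rcases h1 : parse_hhmm (dictGetD iv "from" "") with _ | s <;>
    rcases h2 : parse_hhmm (dictGetD iv "to" "") with _ | e
  · simp
  · simp
  · simp
  have hs := parse_hhmm_bounds _ _ h1
  have he := parse_hhmm_bounds _ _ h2
  simp only []
  split
  · simp
  split
  · rw [Cov_append, Cov_singleton]
    simp only [Bool.and_eq_true, decide_eq_true_eq]
  · rw [Cov_append, Cov_cons, Cov_singleton]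
    simp only [Bool.or_eq_true, decide_eq_true_eq, ge_iff_le]
    constructor
    · rintro (h | (h | h)) <;> [exact Or.inl h; exact Or.inr (Or.inl (by omega)); exact Or.inr (Or.inr (by omega))]
    · rintro (h | (h | h))
      · exact Or.inl h
      · exact Or.inr (Or.inl ⟨h, by omega⟩)
      · exact Or.inr (Or.inr ⟨by omega, h⟩)

theorem foldl_segStep_Cov (m : Int) (hm0 : 0 ≤ m) (hm1 : m < 1440)
    (ivs : List (List (String × String))) :
    ∀ acc, Cov m (ivs.foldl segStep acc) ↔ Cov m acc ∨ ivs.any (altTest m) = true := by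
  induction ivs with
  | nil => intro acc; simp
  | cons iv ivs ih =>
    intro acc
    simp only [List.foldl_cons, List.any_cons, Bool.or_eq_true]
    rw [ih, Cov_segStep m acc iv hm0 hm1]
    tauto

-- insertion with `before` preserves Pairwise R when `before` decides R totally
theorem pairwise_insertBy {α : Type} (R : α → α → Prop) (before : α → α → Bool)
    (hT : ∀ a b, before a b = true → R a b) (hF : ∀ a b, before a b = false → R b a)
    (htrans : ∀ a b c, R a b → R b c → R a c)
    (x : α) (l : List α) (h : l.Pairwise R) :
    (PySem.List.insertBy before x l).Pairwise R := by
  induction l with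
  | nil => simp [PySem.List.insertBy]
  | cons y ys ih =>
    rw [List.pairwise_cons] at h
    by_cases hb : before x y = true
    · show List.Pairwise R (if before x y then x :: y :: ys else _)
      rw [if_pos hb]
      refine List.pairwise_cons.2 ⟨?_, List.pairwise_cons.2 ⟨h.1, h.2⟩⟩
      intro z hz
      rcases List.mem_cons.1 hz with rfl | hz
      · exact hT _ _ hb
      · exact htrans _ _ _ (hT _ _ hb) (h.1 z hz)
    · show List.Pairwise R (if before x y then x :: y :: ys else y :: PySem.List.insertBy before x ys)
      rw [if_neg hb]
      refine List.pairwise_cons.2 ⟨?_, ih h.2⟩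
      intro z hz
      rcases (PySem.List.mem_insertBy before x z ys).1 hz with rfl | hz
      · exact hF _ _ (by simpa using hb)
      · exact h.1 z hz

-- the sorted2 output is ordered by first components
theorem sorted2_pairwise_fst (xs : List (Int × Int)) :
    (PySem.List.sorted2 xs (fun x => x.1) (fun x => x.2)).Pairwise
      (fun a b => a.1 ≤ b.1) := by
  show List.Pairwise _ (xs.foldl (fun acc x => PySem.List.insertBy _ x acc) [])
  suffices h : ∀ acc, acc.Pairwise (fun a b : Int × Int => a.1 ≤ b.1) →
      (xs.foldl (fun acc x => PySem.List.insertBy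
        (fun a b => decide (a.1 < b.1) || !decide (b.1 < a.1) && decide (a.2 < b.2)) x acc) acc).Pairwise
      (fun a b => a.1 ≤ b.1) from h [] (by simp)
  induction xs with
  | nil => intro acc hacc; simpa using hacc
  | cons x xs ih =>
    intro acc hacc
    simp only [List.foldl_cons]
    apply ih
    apply pairwise_insertBy
    · intro a b hab
      simp only [Bool.or_eq_true, Bool.and_eq_true, Bool.not_eq_true', decide_eq_true_eq,
        decide_eq_false_iff_not] at hab
      rcases hab with h | ⟨h, _⟩ <;> omega
    · intro a b hab
      simp only [Bool.or_eq_false_iff, Bool.and_eq_false_iff, Bool.not_eq_false',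
        decide_eq_false_iff_not, decide_eq_true_eq] at hab
      omega
    · intro a b c h1 h2; omega
    · exact hacc

-- the merge loop preserves coverage and segment bounds
set_option maxHeartbeats 1000000 in
theorem merge_foldl_spec (m : Int) (l : List (Int × Int)) :
    ∀ acc, l.Pairwise (fun a b => a.1 ≤ b.1) →
      (∀ p ∈ acc, SegB p) → (∀ p ∈ l, SegB p) →
      (∀ q, acc.getLast? = some q → ∀ p ∈ l, q.1 ≤ p.1) →
      (Cov m (l.foldl mergeStep acc) ↔ Cov m acc ∨ Cov m l) ∧
      (∀ p ∈ l.foldl mergeStep acc, SegB p) := by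
  induction l with
  | nil => intro acc _ hacc _ _; simpa [Cov_nil] using hacc
  | cons se rest ih =>
    intro acc hpw hacc hbl hlast
    rw [List.pairwise_cons] at hpw
    simp only [List.foldl_cons]
    have hse : SegB se := hbl se (by simp)
    have hbl' : ∀ p ∈ rest, SegB p := fun p hp => hbl p (by simp [hp])
    rcases List.eq_nil_or_concat acc with rfl | ⟨ys, last, hconcat⟩
    · -- merged is empty: append
      have hstep : mergeStep [] se = [se] := by simp [mergeStep]
      rw [hstep]
      have := ih [se] hpw.2 (by simpa using hse) hbl'
        (by intro q hq p hp; simp at hq; subst hq; exact hpw.1 p hp)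
      refine ⟨?_, this.2⟩
      rw [this.1, Cov_singleton, Cov_cons]
      have hnil := Cov_nil m
      tauto
    · -- merged ends in `last`
      rw [List.concat_eq_append] at hconcat
      subst hconcat
      have hL : (ys ++ [last]).getLast? = some last := List.getLast?_concat
      have hlastB : SegB last := hacc last (by simp)
      have hdropB : ∀ p ∈ ys, SegB p := fun p hp => hacc p (by simp [hp])
      have hls : last.1 ≤ se.1 := hlast last hL se (by simp)
      by_cases hcmp : se.1 ≤ last.2
      · have hstep : mergeStep (ys ++ [last]) se = ys ++ [(last.1, max last.2 se.2)] := by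
          simp [mergeStep, hL, hcmp]
        rw [hstep]
        have hnewB : SegB (last.1, max last.2 se.2) := by
          rcases hlastB with ⟨a, b, c⟩; rcases hse with ⟨d, e, f⟩
          refine ⟨a, ?_, ?_⟩ <;> simp <;> omega
        have haccB' : ∀ p ∈ ys ++ [(last.1, max last.2 se.2)], SegB p := by
          intro p hp; rcases List.mem_append.1 hp with h | h
          · exact hdropB p h
          · simp at h; subst h; exact hnewB
        have := ih (ys ++ [(last.1, max last.2 se.2)]) hpw.2 haccB' hbl'
          (by intro q hq p hp
              rw [List.getLast?_concat] at hq
              cases hq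
              exact le_trans hls (hpw.1 p hp))
        refine ⟨?_, this.2⟩
        rw [this.1]
        rw [Cov_append, Cov_append, Cov_singleton, Cov_singleton, Cov_cons]
        have hmx : ((last.1, max last.2 se.2).1 ≤ m ∧ m < (last.1, max last.2 se.2).2) ↔
            ((last.1 ≤ m ∧ m < last.2) ∨ (se.1 ≤ m ∧ m < se.2)) := by
          simp only []
          omega
        rw [hmx]; tauto
      · have hstep : mergeStep (ys ++ [last]) se = (ys ++ [last]) ++ [se] := by
          simp [mergeStep, hL, hcmp]
        rw [hstep]
        have haccB' : ∀ p ∈ (ys ++ [last]) ++ [se], SegB p := by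
          intro p hp; rcases List.mem_append.1 hp with h | h
          · exact hacc p h
          · simp at h; subst h; exact hse
        have := ih ((ys ++ [last]) ++ [se]) hpw.2 haccB' hbl'
          (by intro q hq p hp
              rw [List.getLast?_concat] at hq
              cases hq
              exact hpw.1 p hp)
        refine ⟨?_, this.2⟩
        rw [this.1]
        rw [Cov_append, Cov_append, Cov_singleton, Cov_cons, Cov_cons]
        have hnil := Cov_nil m
        tauto

-- a scan with scanTest over segments with e ≤ 1440 is plain coverage
theorem scan_bounded (m : Int) (l : List (Int × Int)) (hl : ∀ p ∈ l, SegB p) :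
    (l.any (scanTest m) = true) ↔ Cov m l := by
  simp only [List.any_eq_true, Cov, scanTest, Bool.or_eq_true, Bool.and_eq_true,
    decide_eq_true_eq]
  constructor <;> rintro ⟨p, hp, h⟩
  · refine ⟨p, hp, ?_⟩
    rcases h with h | h
    · exact h
    · rcases hl p hp with ⟨a, b, c⟩; omega
  · exact ⟨p, hp, Or.inl h⟩

-- the midnight-rewrap step of _normalize_nt_intervals, as a standalone function
def wrapFix (normalized : List (Int × Int)) : List (Int × Int) :=
  match normalized.head?, normalized.getLast? with
  | some first, some last =>
    if first.1 = 0 ∧ last.2 = 24 * 60 then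
      (normalized.drop 1).dropLast ++ [(last.1, first.2 + 24 * 60)]
    else normalized
  | _, _ => normalized

theorem wrapFix_scan (m : Int) (hm0 : 0 ≤ m) (hm1 : m < 1440)
    (merged : List (Int × Int)) (hmB : ∀ p ∈ merged, SegB p) :
    ((wrapFix merged).any (scanTest m) = true) ↔ Cov m merged := by
  cases merged with
  | nil => simp [wrapFix, Cov_nil]
  | cons first t =>
    rcases List.eq_nil_or_concat t with rfl | ⟨ys, last, hc⟩
    · have hfB : SegB first := hmB first (by simp)
      by_cases hw : first.1 = 0 ∧ first.2 = 24 * 60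
      · have hfix : wrapFix [first] = [(first.1, first.2 + 24 * 60)] := by
          simp only [wrapFix, List.head?_cons, List.getLast?_singleton]
          rw [if_pos hw]
          rfl
        rw [hfix, Cov_singleton]
        simp only [List.any_cons, List.any_nil, Bool.or_false, scanTest, Bool.or_eq_true,
          Bool.and_eq_true, decide_eq_true_eq]
        rcases hfB with ⟨a, b, c⟩
        constructor
        · intro _; omega
        · intro _; left; omega
      · have hfix : wrapFix [first] = [first] := by
          simp only [wrapFix, List.head?_cons, List.getLast?_singleton]
          rw [if_neg hw]
        rw [hfix]
        exact scan_bounded m [first] hmB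
    · rw [List.concat_eq_append] at hc; subst hc
      have hfB : SegB first := hmB first (by simp)
      have hlB : SegB last := hmB last (by simp)
      have hysB : ∀ p ∈ ys, SegB p := fun p hp => hmB p (by simp [hp])
      have hget : (first :: (ys ++ [last])).getLast? = some last := by
        rw [← List.cons_append]; exact List.getLast?_concat
      by_cases hw : first.1 = 0 ∧ last.2 = 24 * 60
      · have hfix : wrapFix (first :: (ys ++ [last])) = ys ++ [(last.1, first.2 + 24 * 60)] := by
          simp only [wrapFix, List.head?_cons, hget]
          rw [if_pos hw]
          simp
        rw [hfix, List.any_append, Bool.or_eq_true, scan_bounded m ys hysB]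
        rw [Cov_cons, Cov_append, Cov_singleton]
        simp only [List.any_cons, List.any_nil, Bool.or_false, scanTest, Bool.or_eq_true,
          Bool.and_eq_true, decide_eq_true_eq]
        rcases hfB with ⟨a, b, c⟩
        rcases hlB with ⟨d, e, f⟩
        rcases hw with ⟨g, k⟩
        constructor
        · rintro (h | h)
          · right; left; exact h
          · rcases h with h | h
            · right; right; omega
            · left; omega
        · rintro (h | (h | h))
          · right; right; omega
          · left; exact h
          · right; left; omega
      · have hfix : wrapFix (first :: (ys ++ [last])) = first :: (ys ++ [last]) := by
          simp only [wrapFix, List.head?_cons, hget]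
          rw [if_neg hw]
        rw [hfix]
        exact scan_bounded m _ hmB

-- A's scan over the normalized list is coverage by the raw segment list
theorem A_eq_Cov (intervals : List (List (String × String))) (m : Int)
    (hm0 : 0 ≤ m) (hm1 : m < 1440) :
    ((normalize_nt_intervals intervals).any (scanTest m) = true)
      ↔ Cov m (intervals.foldl segStep []) := by
  have hnorm : normalize_nt_intervals intervals =
      if intervals.foldl segStep [] = [] then []
      else wrapFix ((PySem.List.sorted2 (intervals.foldl segStep [])
        (fun x => x.1) (fun x => x.2)).foldl mergeStep []) := rfl
  rw [hnorm]
  by_cases h0 : intervals.foldl segStep [] = []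
  · rw [if_pos h0, h0]
    simp [Cov_nil]
  · rw [if_neg h0]
    have hperm : (PySem.List.sorted2 (intervals.foldl segStep [])
        (fun x => x.1) (fun x => x.2)).Perm (intervals.foldl segStep []) :=
      PySem.List.sorted2_perm _ _ _ false
    have hssB : ∀ p ∈ PySem.List.sorted2 (intervals.foldl segStep [])
        (fun x => x.1) (fun x => x.2), SegB p :=
      fun p hp => foldl_segStep_bounds intervals [] (by simp) p (hperm.mem_iff.1 hp)
    have hmg := merge_foldl_spec m
      (PySem.List.sorted2 (intervals.foldl segStep []) (fun x => x.1) (fun x => x.2)) []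
      (sorted2_pairwise_fst _) (by simp) hssB (by simp)
    rw [wrapFix_scan m hm0 hm1 _ hmg.2, hmg.1]
    have hCovSS : Cov m (PySem.List.sorted2 (intervals.foldl segStep [])
        (fun x => x.1) (fun x => x.2)) ↔ Cov m (intervals.foldl segStep []) := by
      simp only [Cov]
      exact ⟨fun ⟨p, hp, h⟩ => ⟨p, hperm.mem_iff.1 hp, h⟩,
             fun ⟨p, hp, h⟩ => ⟨p, hperm.mem_iff.2 hp, h⟩⟩
    rw [hCovSS]
    have hnil := Cov_nil m
    tauto

-- ===== VERDICT (by name: the statement is the Claim_ definition above) =====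
theorem is_minute_in_nt_py_spec : Claim_equal_is_minute_in_nt_py := by
  intro intervals minute _
  unfold Spec_is_minute_in_nt_py is_minute_in_nt_py is_minute_in_nt_py_alt
  have hm0 : 0 ≤ PySem.Int.mod minute (24 * 60) := PySem.Int.mod_nonneg _ (by norm_num)
  have hm1 : PySem.Int.mod minute (24 * 60) < 24 * 60 := PySem.Int.mod_lt _ (by norm_num)
  rw [Bool.eq_iff_iff]
  rw [A_eq_Cov intervals _ hm0 (by omega)]
  rw [foldl_segStep_Cov _ hm0 (by omega) intervals []]
  simp [Cov_nil]
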